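-- pv_equiv track=rewrite | github.com/Azki-Mnl/SimplePrimer | simplePrimer.py | calculate_dimer_score
-- ===== SOURCE A (Python) =====
-- def calculate_dimer_score(seq1, seq2):
--     """Calculate potential dimerization score between two sequences"""
--     max_score = 0
--     for i in range(1, min(len(seq1), len(seq2)) + 1):
--         # Check end of seq1 vs start of seq2
--         score = sum(a == b for a, b in zip(seq1[-i:], seq2[:i]))
--         max_score = max(max_score, score)
--
--         # Check end of seq2 vs start of seq1
--         score = sum(a == b for a, b in zip(seq2[-i:], seq1[:i]))
--         max_score = max(max_score, score)
--     return max_score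
-- ===== SOURCE B (Python) =====
-- def calculate_dimer_score(seq1, seq2):
--     """Calculate potential dimerization score between two sequences"""
--     # Diagonal accumulation: one pass over all matching character pairs,
--     # bucketed by alignment offset p - q, then read off the offsets that
--     # correspond to the suffix/prefix overlaps A examines.
--     offs = [p - q for p, a in enumerate(seq1) for q, b in enumerate(seq2) if a == b]
--     counts = {}
--     for d in offs:
--         counts[d] = counts.get(d, 0) + 1
--     n1, n2 = len(seq1), len(seq2)
--     best = 0
--     for i in range(1, min(n1, n2) + 1):
--         best = max(best, counts.get(n1 - i, 0), counts.get(i - n2, 0))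
--     return best
-- ===== Notes on version B (the rewrite author's own statement) =====
-- stated objective: alternative
-- what changed: Instead of re-slicing and re-zipping the two strings for every overlap length, B makes one pass over all matching character pairs, bucketing them in a dictionary keyed by the alignment offset p - q, and then reads the score of each overlap straight off that table.
import Mathlib
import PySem

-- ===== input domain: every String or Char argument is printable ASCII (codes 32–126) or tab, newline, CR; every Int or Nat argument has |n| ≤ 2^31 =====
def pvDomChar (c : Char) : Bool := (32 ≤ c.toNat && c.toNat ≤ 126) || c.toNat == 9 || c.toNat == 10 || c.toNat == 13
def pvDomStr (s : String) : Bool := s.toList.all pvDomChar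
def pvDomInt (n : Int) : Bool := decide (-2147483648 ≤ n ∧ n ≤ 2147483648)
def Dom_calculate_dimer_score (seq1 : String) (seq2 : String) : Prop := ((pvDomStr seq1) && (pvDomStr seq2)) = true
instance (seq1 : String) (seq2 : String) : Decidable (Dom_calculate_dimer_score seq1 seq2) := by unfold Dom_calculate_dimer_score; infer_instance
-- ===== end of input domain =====

-- B replaces A's per-overlap slice-and-zip rescans by one pass over all matching
-- character pairs bucketed by alignment offset p - q (objective: alternative).

-- ===== PORT A =====
def calculate_dimer_score (seq1 : String) (seq2 : String) : Int :=
  let l1 := seq1.toList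
  let l2 := seq2.toList
  (PySem.List.pyRange 1 (min (PySem.Str.len seq1) (PySem.Str.len seq2) + 1) 1).foldl
    (fun max_score i =>
      -- score = sum(a == b for a, b in zip(seq1[-i:], seq2[:i])); max_score = max(max_score, score)
      let score := (((PySem.List.slice l1 (some (-i)) none).zip
                     (PySem.List.slice l2 none (some i))).map
                      (fun ab => if ab.1 == ab.2 then (1 : Int) else 0)).sum
      let max_score := max max_score score
      -- score = sum(a == b for a, b in zip(seq2[-i:], seq1[:i])); max_score = max(max_score, score)
      let score := (((PySem.List.slice l2 (some (-i)) none).zip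
                     (PySem.List.slice l1 none (some i))).map
                      (fun ab => if ab.1 == ab.2 then (1 : Int) else 0)).sum
      max max_score score) 0

-- ===== PORT B =====
def calculate_dimer_score_alt (seq1 : String) (seq2 : String) : Int :=
  -- offs = [p - q for p, a in enumerate(seq1) for q, b in enumerate(seq2) if a == b]
  let offs : List Int :=
    (PySem.List.enumerate seq1.toList).flatMap (fun pa =>
      ((PySem.List.enumerate seq2.toList).filter (fun qb => pa.2 == qb.2)).map
        (fun qb => pa.1 - qb.1))
  -- counts[d] = counts.get(d, 0) + 1
  let counts : PySem.Dict Int Int :=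
    offs.foldl (fun d x => d.insert x (d.getD x 0 + 1)) PySem.Dict.empty
  let n1 := PySem.Str.len seq1
  let n2 := PySem.Str.len seq2
  (PySem.List.pyRange 1 (min n1 n2 + 1) 1).foldl
    (fun best i => max (max best (counts.getD (n1 - i) 0)) (counts.getD (i - n2) 0)) 0

-- ===== PRECONDITION & SPEC =====
def Spec_calculate_dimer_score (seq1 : String) (seq2 : String) (out : Int) : Prop := out = calculate_dimer_score_alt seq1 seq2
instance (seq1 : String) (seq2 : String) (out : Int) : Decidable (Spec_calculate_dimer_score seq1 seq2 out) := by unfold Spec_calculate_dimer_score; infer_instance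

-- ===== CLAIM (what is proved, stated in full; the proofs are below) =====
def Claim_equal_calculate_dimer_score : Prop := ∀ (seq1 : String) (seq2 : String), Dom_calculate_dimer_score seq1 seq2 → Spec_calculate_dimer_score seq1 seq2 (calculate_dimer_score seq1 seq2)

-- ===== LEMMAS AND PROOFS =====

-- offsets contributed by one character a of seq1 (enumerate index s) against all of seq2
def rowOffs (a : Char) (y : List Char) (s : Int) : List Int :=
  ((PySem.List.enumerate y).filter (fun qb => a == qb.2)).map (fun qb => s - qb.1)

-- the whole offsets list, row by row, the row of x[k] carrying enumerate index s + k
def offsL : List Char → List Char → Int → List Int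
  | [], _, _ => []
  | a :: x, y, s => rowOffs a y s ++ offsL x y (s + 1)

-- number of character matches of x and y along the diagonal p - q = v
def diagCnt (x y : List Char) (v : Int) : Nat :=
  if 0 ≤ v then ((x.drop v.toNat).zip y).countP (fun p => p.1 == p.2)
  else (x.zip (y.drop (-v).toNat)).countP (fun p => p.1 == p.2)

theorem offs_eq_offsL (x y : List Char) : ∀ s : Int,
    (PySem.List.enumerate x s).flatMap (fun pa =>
      ((PySem.List.enumerate y).filter (fun qb => pa.2 == qb.2)).map (fun qb => pa.1 - qb.1))
    = offsL x y s := by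
  induction x with
  | nil => intro s; simp [PySem.List.enumerate_nil, offsL]
  | cons a x ih =>
      intro s
      simp [PySem.List.enumerate_cons, offsL, rowOffs, ih]

theorem enum_countP (a : Char) : ∀ (y : List Char) (k t : Int),
    (PySem.List.enumerate y k).countP (fun qb => (a == qb.2) && (qb.1 == t))
    = if 0 ≤ t - k ∧ y[(t - k).toNat]? = some a then 1 else 0 := by
  intro y
  induction y with
  | nil => intro k t; simp [PySem.List.enumerate_nil]
  | cons b y ih =>
      intro k t
      rw [PySem.List.enumerate_cons, List.countP_cons, ih (k + 1) t]
      by_cases hk : t = k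
      · subst hk
        have h1 : ¬ (0 ≤ t - (t + 1) ∧ y[(t - (t + 1)).toNat]? = some a) := by omega
        have h2 : (t - t).toNat = 0 := by omega
        rw [if_neg h1]
        simp [eq_comm (a := b)]
      · by_cases hlt : t - k < 0
        · have h1 : ¬ (0 ≤ t - (k + 1) ∧ y[(t - (k + 1)).toNat]? = some a) :=
            fun h => absurd h.1 (by omega)
          have h2 : ¬ (0 ≤ t - k ∧ (b :: y)[(t - k).toNat]? = some a) :=
            fun h => absurd h.1 (by omega)
          rw [if_neg h1, if_neg h2]
          simp [Ne.symm hk]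
        · have h2 : (t - k).toNat = (t - (k + 1)).toNat + 1 := by omega
          have e1 : (b :: y)[(t - k).toNat]? = y[(t - (k + 1)).toNat]? := by
            rw [h2]; simp
          simp [e1, Ne.symm hk, show k < t by omega, show k ≤ t by omega]

theorem rowOffs_count (a : Char) (y : List Char) (s v : Int) :
    (rowOffs a y s).count v = if 0 ≤ s - v ∧ y[(s - v).toNat]? = some a then 1 else 0 := by
  have h := enum_countP a y 0 (s - v)
  rw [Int.sub_zero] at h
  rw [rowOffs, List.count_eq_countP, List.countP_map, List.countP_filter, ← h]
  apply List.countP_congr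
  intro qb _
  simp only [Function.comp, Bool.and_eq_true, beq_iff_eq]
  constructor
  · rintro ⟨h1, h2⟩; exact ⟨h2, by omega⟩
  · rintro ⟨h1, h2⟩; exact ⟨by omega, h1⟩

theorem offsL_count (y : List Char) (v : Int) : ∀ (x : List Char) (s : Int),
    (offsL x y s).count v = diagCnt x y (v - s) := by
  intro x
  induction x with
  | nil =>
      intro s
      rw [offsL, diagCnt]
      split <;> simp
  | cons a x ih =>
      intro s
      rw [offsL, List.count_append, rowOffs_count, ih (s + 1),
          show v - (s + 1) = (v - s) - 1 from by omega,
          show s - v = -(v - s) from by omega]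
      set t := v - s with ht
      rcases lt_trichotomy t 0 with h0 | h0 | h0
      · -- t < 0 : both diagCnt in the negative branch
        have he : (-(t - 1)).toNat = (-t).toNat + 1 := by omega
        rw [diagCnt, if_neg (show ¬ (0:Int) ≤ t - 1 from by omega), he,
            diagCnt, if_neg (show ¬ (0:Int) ≤ t from by omega)]
        cases hy : y[(-t).toNat]? with
        | none =>
            have hlen : y.length ≤ (-t).toNat := List.getElem?_eq_none_iff.mp hy
            rw [if_neg (by simp), List.drop_eq_nil_of_le hlen,
                List.drop_eq_nil_of_le (by omega), List.zip_nil_right]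
            simp
        | some c =>
            obtain ⟨hlt, hgc⟩ := List.getElem?_eq_some_iff.mp hy
            have hd : y.drop (-t).toNat = c :: y.drop ((-t).toNat + 1) := by
              rw [List.drop_eq_getElem_cons hlt, hgc]
            rw [hd, List.zip_cons_cons, List.countP_cons]
            by_cases hac : c = a
            · subst hac
              rw [if_pos ⟨by omega, rfl⟩]
              simp [Nat.add_comm]
            · rw [if_neg (fun h => hac (Option.some_inj.mp h.2))]
              simp [Ne.symm hac]
      · -- t = 0
        rw [h0, show (0:Int) - 1 = -1 from by omega,
            show diagCnt x y (-1) = (x.zip (y.drop 1)).countP (fun p => p.1 == p.2) from by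
              rw [diagCnt, if_neg (by omega)]; norm_num,
            show diagCnt (a :: x) y 0 = ((a :: x).zip y).countP (fun p => p.1 == p.2) from by
              rw [diagCnt, if_pos (by omega)]; norm_num]
        norm_num
        cases y with
        | nil => simp
        | cons b y' =>
            rw [List.zip_cons_cons, List.countP_cons]
            by_cases hab : b = a
            · subst hab
              simp [Nat.add_comm]
            · simp [hab, Ne.symm hab]
      · -- 0 < t
        rw [if_neg (fun h => absurd h.1 (by omega)),
            diagCnt, if_pos (show (0:Int) ≤ t - 1 from by omega),
            diagCnt, if_pos (show (0:Int) ≤ t from by omega),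
            show t.toNat = (t - 1).toNat + 1 from by omega, List.drop_succ_cons]
        omega

theorem zip_take_right : ∀ (u w : List Char) (n : Nat), u.length ≤ n → u.zip (w.take n) = u.zip w := by
  intro u
  induction u with
  | nil => simp
  | cons a u ih =>
      intro w n h
      cases w with
      | nil => simp
      | cons b w =>
          cases n with
          | zero => simp at h
          | succ m => simp [ih w m (by simpa using h)]

theorem zip_take_left : ∀ (u w : List Char) (n : Nat), w.length ≤ n → (u.take n).zip w = u.zip w := by
  intro u
  induction u with
  | nil => simp
  | cons a u ih =>
      intro w n h
      cases w with
      | nil => simp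
      | cons b w =>
          cases n with
          | zero => simp at h
          | succ m => simp [ih w m (by simpa using h)]

theorem countP_zip_swap (u w : List Char) :
    (u.zip w).countP (fun p => p.1 == p.2) = (w.zip u).countP (fun p => p.1 == p.2) := by
  rw [← List.zip_swap w u, List.countP_map]
  apply List.countP_congr
  intro p _
  cases p
  simp only [Function.comp_apply, Prod.swap_prod_mk, beq_iff_eq]
  exact eq_comm

theorem diag_eq_A1 (x y : List Char) (k : Nat) (hkx : k ≤ x.length) (_hky : k ≤ y.length) :
    ((x.drop (x.length - k)).zip (y.take k)).countP (fun p => p.1 == p.2)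
    = diagCnt x y ((x.length : Int) - (k : Int)) := by
  rw [zip_take_right _ _ _ (by rw [List.length_drop]; omega), diagCnt, if_pos (by omega),
      show ((x.length : Int) - (k : Int)).toNat = x.length - k from by omega]

theorem diag_eq_A2 (x y : List Char) (k : Nat) (hkx : k ≤ x.length) (hky : k ≤ y.length) :
    ((y.drop (y.length - k)).zip (x.take k)).countP (fun p => p.1 == p.2)
    = diagCnt x y ((k : Int) - (y.length : Int)) := by
  rcases Nat.lt_or_ge k y.length with hlt | hge
  · rw [diagCnt, if_neg (by omega),
        show (-((k:Int) - y.length)).toNat = y.length - k from by omega,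
        countP_zip_swap, zip_take_left _ _ _ (by rw [List.length_drop]; omega)]
  · have hk : k = y.length := by omega
    subst hk
    rw [diagCnt, if_pos (by omega), show ((y.length:Int) - y.length).toNat = 0 from by omega]
    simp only [Nat.sub_self, List.drop_zero]
    rw [zip_take_right _ _ _ (le_refl _), countP_zip_swap]

theorem calculate_dimer_score_spec' (seq1 seq2 : String) :
    calculate_dimer_score seq1 seq2 = calculate_dimer_score_alt seq1 seq2 := by
  unfold calculate_dimer_score calculate_dimer_score_alt
  simp only [PySem.Str.len_eq]
  apply PySem.List.foldl_congr_mem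
  intro acc i hi
  obtain ⟨h1, h2⟩ := PySem.List.mem_pyRange_one.mp hi
  lift i to ℕ using (by omega : (0:Int) ≤ i) with k
  have hkx : k ≤ seq1.toList.length := by
    rw [Int.min_def] at h2; split at h2 <;> omega
  have hky : k ≤ seq2.toList.length := by
    rw [Int.min_def] at h2; split at h2 <;> omega
  have hk1 : 1 ≤ k := by exact_mod_cast h1
  rw [offs_eq_offsL,
      PySem.Dict.getD_foldl_insert_add_one, PySem.Dict.getD_foldl_insert_add_one,
      PySem.Dict.getD_empty, offsL_count, offsL_count, Int.sub_zero, Int.sub_zero,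
      PySem.List.slice_from_neg_natCast seq1.toList k (by omega),
      PySem.List.slice_to_natCast seq2.toList k,
      PySem.List.slice_from_neg_natCast seq2.toList k (by omega),
      PySem.List.slice_to_natCast seq1.toList k,
      PySem.List.sum_map_ite_one_zero, PySem.List.sum_map_ite_one_zero,
      diag_eq_A1 seq1.toList seq2.toList k hkx hky,
      diag_eq_A2 seq1.toList seq2.toList k hkx hky]
  norm_num

-- ===== VERDICT (by name: the statement is the Claim_ definition above) =====
theorem calculate_dimer_score_spec : Claim_equal_calculate_dimer_score := by
  intro seq1 seq2 _
  exact calculate_dimer_score_spec' seq1 seq2
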